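-- pv_equiv track=rewrite | github.com/georgi-lyubenov/HackBulgaria | test.py | biggest_difference
-- ===== SOURCE A (Python) =====
-- def biggest_difference(arr):
--     min = 0
--
--     def helper(num, arr):
--         min = 0
--         for i in arr:
--             if num - i < min:
--                 min = num - i
--         return min
--     for i in arr:
--         if helper(i, arr) < min:
--             min = helper(i, arr)
--     return min
-- ===== SOURCE B (Python) =====
-- def biggest_difference(arr):
--     if not arr:
--         return 0
--     s = sorted(arr)
--     d = s[0] - s[-1]
--     return d if d < 0 else 0
-- ===== Notes on version B (the rewrite author's own statement) =====
-- stated objective: faster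
-- what changed: Replaces the quadratic nested pairwise scan (helper even called twice per element) with one sort and a single endpoint subtraction min(arr)-max(arr) clamped at 0.
import Mathlib
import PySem

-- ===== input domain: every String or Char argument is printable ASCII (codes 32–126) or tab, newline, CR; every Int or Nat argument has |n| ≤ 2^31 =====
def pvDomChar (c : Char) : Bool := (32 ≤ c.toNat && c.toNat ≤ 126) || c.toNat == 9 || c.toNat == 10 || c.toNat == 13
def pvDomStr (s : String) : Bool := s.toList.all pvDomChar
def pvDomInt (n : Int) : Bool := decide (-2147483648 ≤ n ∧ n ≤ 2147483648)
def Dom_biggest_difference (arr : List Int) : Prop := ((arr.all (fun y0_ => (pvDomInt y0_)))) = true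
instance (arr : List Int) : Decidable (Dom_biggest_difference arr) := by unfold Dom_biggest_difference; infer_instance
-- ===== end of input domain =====

-- B replaces A's quadratic nested pairwise scan by one sort plus an endpoint subtraction clamped at 0 (measurably faster).

-- ===== PORT A =====
def bdHelper (num : Int) (arr : List Int) : Int :=
  arr.foldl (fun m i => if num - i < m then num - i else m) 0

def biggest_difference (arr : List Int) : Int :=
  arr.foldl (fun m i => if bdHelper i arr < m then bdHelper i arr else m) 0

-- ===== PORT B =====
def biggest_difference_alt (arr : List Int) : Int :=
  if arr = [] then 0
  else
    let s := PySem.List.sorted arr (fun x => x) false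
    let d := ((PySem.List.pyGet? s 0).getD 0) - ((PySem.List.pyGet? s (-1)).getD 0)
    if d < 0 then d else 0

-- ===== PRECONDITION & SPEC =====
def Spec_biggest_difference (arr : List Int) (out : Int) : Prop := out = biggest_difference_alt arr
instance (arr : List Int) (out : Int) : Decidable (Spec_biggest_difference arr out) := by unfold Spec_biggest_difference; infer_instance

-- ===== CLAIM (what is proved, stated in full; the proofs are below) =====
def Claim_equal_biggest_difference : Prop := ∀ (arr : List Int), Dom_biggest_difference arr → Spec_biggest_difference arr (biggest_difference arr)

-- ===== LEMMAS AND PROOFS =====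

-- the if-step of A's loops is an Int min
theorem foldl_if_eq_min {α : Type} (f : α → Int) (l : List α) (c : Int) :
    l.foldl (fun m x => if f x < m then f x else m) c = (l.map f).foldl min c := by
  induction l generalizing c with
  | nil => rfl
  | cons x t ih =>
      simp only [List.foldl_cons, List.map_cons, ih]
      congr 1
      rcases lt_or_ge (f x) c with h | h
      · simp [h, le_of_lt h]
      · simp [not_lt.mpr h, h]

theorem fmin_le_init (l : List Int) (c : Int) : l.foldl min c ≤ c := by
  induction l generalizing c with
  | nil => exact le_rfl
  | cons x t ih => exact le_trans (ih (min c x)) (min_le_left _ _)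

theorem fmin_le_mem (l : List Int) (c x : Int) (hx : x ∈ l) : l.foldl min c ≤ x := by
  induction l generalizing c with
  | nil => cases hx
  | cons y t ih =>
      rcases List.mem_cons.mp hx with h | h
      · subst h; exact le_trans (fmin_le_init t (min c x)) (min_le_right _ _)
      · exact ih (min c y) h

theorem fmin_cases (l : List Int) (c : Int) :
    l.foldl min c = c ∨ ∃ x ∈ l, l.foldl min c = x := by
  induction l generalizing c with
  | nil => exact Or.inl rfl
  | cons y t ih =>
      rcases ih (min c y) with h | ⟨x, hx, hfx⟩
      · rcases min_cases c y with ⟨he, _⟩ | ⟨he, _⟩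
        · exact Or.inl (by simpa [he] using h)
        · exact Or.inr ⟨y, List.mem_cons_self, by simpa [he] using h⟩
      · exact Or.inr ⟨x, List.mem_cons_of_mem _ hx, hfx⟩

-- A's characterization
theorem A_le_zero (arr : List Int) : biggest_difference arr ≤ 0 := by
  rw [biggest_difference, foldl_if_eq_min]
  exact fmin_le_init _ _

theorem A_le_diff (arr : List Int) (i j : Int) (hi : i ∈ arr) (hj : j ∈ arr) :
    biggest_difference arr ≤ i - j := by
  rw [biggest_difference, foldl_if_eq_min]
  have h1 : (arr.map (fun i => bdHelper i arr)).foldl min 0 ≤ bdHelper i arr :=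
    fmin_le_mem _ _ _ (List.mem_map_of_mem hi)
  have h2 : bdHelper i arr ≤ i - j := by
    rw [bdHelper, foldl_if_eq_min]
    exact fmin_le_mem _ _ _ (List.mem_map_of_mem hj)
  exact le_trans h1 h2

theorem A_attained (arr : List Int) :
    biggest_difference arr = 0 ∨ ∃ i ∈ arr, ∃ j ∈ arr, biggest_difference arr = i - j := by
  rw [biggest_difference, foldl_if_eq_min]
  rcases fmin_cases (arr.map (fun i => bdHelper i arr)) 0 with h | ⟨x, hx, hfx⟩
  · exact Or.inl h
  · rcases List.mem_map.mp hx with ⟨i, hi, rfl⟩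
    rw [bdHelper, foldl_if_eq_min] at hfx
    rcases fmin_cases (arr.map (fun j => i - j)) 0 with h | ⟨y, hy, hfy⟩
    · exact Or.inl (hfx.trans h)
    · rcases List.mem_map.mp hy with ⟨j, hj, rfl⟩
      exact Or.inr ⟨i, hi, j, hj, hfx.trans hfy⟩

-- in a ≤-pairwise list every element is at most the last
theorem pairwise_le_getLast : ∀ (l : List Int), l.Pairwise (· ≤ ·) → ∀ (h : l ≠ []),
    ∀ y ∈ l, y ≤ l.getLast h
  | [], _, h => absurd rfl h
  | [a], _, _ => by intro y hy; simp at hy; simp [hy]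
  | a :: b :: t, hp, _ => by
      intro y hy
      have ihb := pairwise_le_getLast (b :: t) hp.of_cons (by simp)
      rw [List.getLast_cons (by simp)]
      rcases List.mem_cons.mp hy with rfl | hyt
      · exact le_trans ((List.pairwise_cons.mp hp).1 b List.mem_cons_self)
          (ihb b List.mem_cons_self)
      · exact ihb y hyt

theorem biggest_difference_spec' (arr : List Int) :
    biggest_difference arr = biggest_difference_alt arr := by
  by_cases hnil : arr = []
  · subst hnil; rfl
  · simp only [biggest_difference_alt, if_neg hnil]
    set s := PySem.List.sorted arr (fun x => x) false with hs
    have hsne : s ≠ [] := by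
      intro h
      exact hnil ((PySem.List.sorted_eq_nil_iff _ _ _).mp h)
    obtain ⟨m, t, hmt⟩ := List.exists_cons_of_ne_nil hsne
    have hperm : s.Perm arr := PySem.List.sorted_perm ..
    have hpw : s.Pairwise (fun a b => (fun x => x) a ≤ (fun x => x) b) :=
      PySem.List.sorted_pairwise ..
    simp only at hpw
    -- endpoints
    have hget0 : (PySem.List.pyGet? s 0).getD 0 = m := by
      rw [hmt, PySem.List.pyGet?_zero_cons]; rfl
    have hlast : (PySem.List.pyGet? s (-1)).getD 0 = s.getLast hsne := by
      rw [PySem.List.pyGet?_neg_one, List.getLast?_eq_getLast_of_ne_nil hsne]; rfl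
    rw [hget0, hlast]
    set L := s.getLast hsne with hL
    -- m is the minimum, L the maximum of arr
    have hmin : ∀ y ∈ arr, m ≤ y := by
      intro y hy
      exact PySem.List.key_head_sorted_le (xs := arr) (key := fun x => x) hmt y hy
    have hmax : ∀ y ∈ arr, y ≤ L := by
      intro y hy
      exact pairwise_le_getLast s hpw hsne y (hperm.mem_iff.mpr hy)
    have hmmem : m ∈ arr := hperm.mem_iff.mp (hmt ▸ List.mem_cons_self)
    have hLmem : L ∈ arr := hperm.mem_iff.mp (List.getLast_mem hsne)
    -- B ≤ A and A ≤ B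
    have hd : m - L ≤ 0 := by
      have := hmax m hmmem; omega
    have hBdef : (if m - L < 0 then m - L else 0) = m - L ∨
        (if m - L < 0 then m - L else 0) = 0 := by
      split_ifs <;> simp
    have hAleB : biggest_difference arr ≤ (if m - L < 0 then m - L else 0) := by
      rcases hBdef with h | h
      · rw [h]; exact A_le_diff arr m L hmmem hLmem
      · rw [h]; exact A_le_zero arr
    have hBleA : (if m - L < 0 then m - L else 0) ≤ biggest_difference arr := by
      rcases A_attained arr with h | ⟨i, hi, j, hj, h⟩
      · rw [h]; split_ifs with hlt
        · omega
        · exact le_rfl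
      · rw [h]
        have h1 : m ≤ i := hmin i hi
        have h2 : j ≤ L := hmax j hj
        split_ifs <;> omega
    omega

-- ===== VERDICT (by name: the statement is the Claim_ definition above) =====
theorem biggest_difference_spec : Claim_equal_biggest_difference := by
  intro arr _
  exact biggest_difference_spec' arr
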